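-- pv_equiv track=rewrite | github.com/oscar-byte15/Python_Project_WazeComplex | tfbase/shortestPath.py | getBestPaths
-- ===== SOURCE A (Python) =====
-- def getBestPaths(paths, costs):
--     bestCosts = [(i, x) for i, x in enumerate(costs)]
--     bestCosts.sort(key=lambda x:x[1])
--
--     n = len(bestCosts)
--     if n > 3:
--         bestCosts = [bestCosts[i] for i in range(3)]
--     else:
--         bestCosts = [bestCosts[i] for i in range(n)]
--
--     bestPaths = [paths[c[0]] for c in bestCosts]
--
--     return bestPaths
-- ===== SOURCE B (Python) =====
-- def getBestPaths(paths, costs):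
--     n = len(costs)
--     used = set()
--     picks = []
--     for _ in range(min(3, n)):
--         best = -1
--         for i in range(n):
--             if i in used:
--                 continue
--             if best == -1 or costs[i] < costs[best]:
--                 best = i
--         used.add(best)
--         picks.append(best)
--     return [paths[i] for i in picks]
-- ===== Notes on version B (the rewrite author's own statement) =====
-- stated objective: alternative
-- what changed: B replaces A's full stable sort of (index, cost) pairs plus slicing by min(3, n) left-to-right strict-min scans over a used-index set (partial selection), reproducing the stable tie-break because a strict '<' keeps the earliest index.
import Mathlib
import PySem

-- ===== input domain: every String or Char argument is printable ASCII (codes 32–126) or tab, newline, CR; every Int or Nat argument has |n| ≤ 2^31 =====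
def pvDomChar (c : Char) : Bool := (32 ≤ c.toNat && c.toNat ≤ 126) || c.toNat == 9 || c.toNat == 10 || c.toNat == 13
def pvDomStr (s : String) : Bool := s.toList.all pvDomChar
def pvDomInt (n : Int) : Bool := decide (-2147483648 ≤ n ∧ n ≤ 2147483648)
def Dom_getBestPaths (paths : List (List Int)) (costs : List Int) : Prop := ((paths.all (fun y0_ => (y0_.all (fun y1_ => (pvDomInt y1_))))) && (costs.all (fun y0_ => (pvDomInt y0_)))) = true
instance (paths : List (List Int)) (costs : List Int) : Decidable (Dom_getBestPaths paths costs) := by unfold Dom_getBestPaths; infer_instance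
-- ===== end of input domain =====

-- B replaces the full stable sort of all costs by min(3, n) left-to-right strict-min scans over a
-- used-index set (partial selection), a different algorithm of the same exact behaviour.

-- ===== PORT A =====
-- pyGetD is exact here: both comprehension indices range over [0, len bestCosts), and paths[c[0]]
-- is in range on every input admitted by Pre_getBestPaths.
def getBestPaths (paths : List (List Int)) (costs : List Int) : List (List Int) :=
  let bestCosts := PySem.List.sorted (PySem.List.enumerate costs 0) (fun x => x.2) false
  let n : Int := bestCosts.length
  let bestCosts2 :=
    if n > 3 then (PySem.List.pyRange 0 3 1).map (fun i => PySem.List.pyGetD bestCosts i (0, 0))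
    else (PySem.List.pyRange 0 n 1).map (fun i => PySem.List.pyGetD bestCosts i (0, 0))
  bestCosts2.map (fun c => PySem.List.pyGetD paths c.1 [])

-- ===== PORT B =====
-- inner 'for i in range(n)' scan: running best index, -1 sentinel, strict '<' so the first
-- (lowest-index) minimum among unused indices wins; costs[i]/costs[best] are in range (pyGetD exact).
def pvScan (costs : List Int) (used : PySem.Set Int) : Int :=
  (PySem.List.pyRange 0 (costs.length : Int) 1).foldl
    (fun best i =>
      if PySem.Set.contains used i then best
      else if best == -1 || PySem.List.pyGetD costs i 0 < PySem.List.pyGetD costs best 0 then i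
      else best)
    (-1)

-- outer 'for _ in range(min(3, n))' loop, accumulating picks and the used set
def pvPicks (costs : List Int) : Nat → PySem.Set Int → List Int
  | 0, _ => []
  | k + 1, used =>
    let b := pvScan costs used
    b :: pvPicks costs k (PySem.Set.add used b)

def getBestPaths_alt (paths : List (List Int)) (costs : List Int) : List (List Int) :=
  (pvPicks costs (min 3 costs.length) PySem.Set.empty).map
    (fun i => PySem.List.pyGetD paths i [])

-- ===== PRECONDITION & SPEC =====
-- Pre_ excludes exactly the inputs where Python A raises IndexError: some selected index j
-- (an index with fewer than 3 strictly-earlier-ranked competitors under (cost, index) order)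
-- is ≥ len(paths).  B raises there too; the ports are total via pyGetD, so nothing is claimed there.
def Pre_getBestPaths (paths : List (List Int)) (costs : List Int) : Prop :=
  ∀ j ∈ List.range costs.length, paths.length ≤ j →
    3 ≤ ((List.range costs.length).filter
          (fun i => costs.getD i 0 < costs.getD j 0 ∨ (costs.getD i 0 = costs.getD j 0 ∧ i < j))).length
instance (paths : List (List Int)) (costs : List Int) : Decidable (Pre_getBestPaths paths costs) := by
  unfold Pre_getBestPaths; infer_instance

def pvWitness_getBestPaths : List (List Int) × List Int := ([[1, 2], [3]], [5, 4])

def Spec_getBestPaths (paths : List (List Int)) (costs : List Int) (out : List (List Int)) : Prop := out = getBestPaths_alt paths costs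
instance (paths : List (List Int)) (costs : List Int) (out : List (List Int)) : Decidable (Spec_getBestPaths paths costs out) := by unfold Spec_getBestPaths; infer_instance

-- ===== CLAIM (what is proved, stated in full; the proofs are below) =====
def Claim_equal_getBestPaths : Prop := ∀ (paths : List (List Int)) (costs : List Int), Dom_getBestPaths paths costs → Pre_getBestPaths paths costs → Spec_getBestPaths paths costs (getBestPaths paths costs)

-- ===== LEMMAS AND PROOFS =====

-- the stable-sort order on (index, cost) pairs: by cost, ties by original index
def pvLt (p q : Int × Int) : Prop := p.2 < q.2 ∨ (p.2 = q.2 ∧ p.1 < q.1)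

theorem pvLt_asymm {p q : Int × Int} (h1 : pvLt p q) (h2 : pvLt q p) : False := by
  rcases h1 with h1 | ⟨h1, h1'⟩ <;> rcases h2 with h2 | ⟨h2, h2'⟩ <;> omega

theorem pvLt_trans {p q r : Int × Int} (h1 : pvLt p q) (h2 : pvLt q r) : pvLt p r := by
  rcases h1 with h1 | ⟨h1, h1'⟩ <;> rcases h2 with h2 | ⟨h2, h2'⟩ <;>
    [exact Or.inl (by omega); exact Or.inl (by omega); exact Or.inl (by omega);
     exact Or.inr (by omega)]

-- a permutation pairwise-ordered by an asymmetric relation is unique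
theorem pvUniq : ∀ {l₁ l₂ : List (Int × Int)}, l₁.Perm l₂ →
    l₁.Pairwise pvLt → l₂.Pairwise pvLt → l₁ = l₂ := by
  intro l₁
  induction l₁ with
  | nil => intro l₂ hp _ _; exact (hp.nil_eq).symm ▸ rfl
  | cons a t₁ ih =>
    intro l₂ hp h1 h2
    cases l₂ with
    | nil => exact absurd hp.symm (by simp)
    | cons b t₂ =>
      by_cases hab : a = b
      · subst hab
        have := ih (hp.cons_inv) h1.of_cons h2.of_cons
        rw [this]
      · exfalso
        have ha : a ∈ t₂ := by
          have := hp.mem_iff.mp (List.mem_cons_self ..)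
          simpa [hab] using this
        have hb : b ∈ t₁ := by
          have := hp.mem_iff.mpr (List.mem_cons_self ..)
          rcases List.mem_cons.mp this with h | h
          · exact absurd h.symm hab
          · exact h
        exact pvLt_asymm (List.rel_of_pairwise_cons h1 hb) (List.rel_of_pairwise_cons h2 ha)

theorem pv_insertBy_pairwise (x : Int × Int) :
    ∀ (ys : List (Int × Int)), ys.Pairwise pvLt → (∀ y ∈ ys, y.1 < x.1) →
    (PySem.List.insertBy (fun a b => decide (a.2 < b.2)) x ys).Pairwise pvLt := by
  intro ys
  induction ys with
  | nil => intro _ _; simp [PySem.List.insertBy]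
  | cons y ys ih =>
    intro hpw hfst
    simp only [PySem.List.insertBy]
    split_ifs with h
    · have hxy : x.2 < y.2 := by simpa using h
      constructor
      · intro z hz
        rcases List.mem_cons.mp hz with rfl | hz
        · exact Or.inl hxy
        · have : pvLt y z := List.rel_of_pairwise_cons hpw hz
          exact pvLt_trans (Or.inl hxy) this
      · exact hpw
    · have hyx : ¬ x.2 < y.2 := by simpa using h
      constructor
      · intro z hz
        rcases (PySem.List.mem_insertBy _ _ _ _).mp hz with hzx | hz
        · subst hzx
          have hy1 : y.1 < z.1 := hfst y (List.mem_cons_self ..)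
          rcases lt_or_eq_of_le (le_of_not_gt hyx) with h' | h'
          · exact Or.inl h'
          · exact Or.inr ⟨h', hy1⟩
        · exact List.rel_of_pairwise_cons hpw hz
      · exact ih hpw.of_cons (fun z hz => hfst z (List.mem_cons_of_mem _ hz))

theorem pv_foldl_insertBy_pairwise :
    ∀ (M acc : List (Int × Int)), acc.Pairwise pvLt →
      (∀ a ∈ acc, ∀ p ∈ M, a.1 < p.1) → M.Pairwise (fun p q => p.1 < q.1) →
      (M.foldl (fun acc x => PySem.List.insertBy (fun a b => decide (a.2 < b.2)) x acc) acc).Pairwise pvLt := by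
  intro M
  induction M with
  | nil => intro acc h _ _; exact h
  | cons p M ih =>
    intro acc hacc hlt hM
    simp only [List.foldl_cons]
    apply ih
    · exact pv_insertBy_pairwise p acc hacc (fun a ha => hlt a ha p (List.mem_cons_self ..))
    · intro a ha q hq
      rcases (PySem.List.mem_insertBy _ _ _ _).mp ha with rfl | ha
      · exact List.rel_of_pairwise_cons hM hq
      · exact hlt a ha q (List.mem_cons_of_mem _ hq)
    · exact hM.of_cons

-- stability: sorting pairs with strictly increasing first components by their second
-- component yields a list pairwise ordered by pvLt
theorem pv_sorted_pairwise_pvLt (M : List (Int × Int))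
    (hM : M.Pairwise (fun p q => p.1 < q.1)) :
    (PySem.List.sorted M (fun x => x.2) false).Pairwise pvLt := by
  rw [PySem.List.sorted_eq_foldl_insertBy]
  exact pv_foldl_insertBy_pairwise M [] (List.Pairwise.nil) (by simp) hM

-- head decomposition of the stable sort at its pvLt-minimum
theorem pv_sorted_cons_min (R : List (Int × Int)) (e : Int × Int)
    (hR : R.Pairwise (fun p q => p.1 < q.1)) (he : e ∈ R)
    (hmin : ∀ a ∈ R, a = e ∨ pvLt e a) :
    PySem.List.sorted R (fun x => x.2) false =
      e :: PySem.List.sorted (R.filter (fun p => p.1 ≠ e.1)) (fun x => x.2) false := by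
  obtain ⟨s, t, rfl⟩ := List.append_of_mem he
  have hs : ∀ a ∈ s, a.1 < e.1 := by
    intro a ha
    exact List.pairwise_append.mp hR |>.2.2 a ha e (List.mem_cons_self ..)
  have ht : ∀ a ∈ t, e.1 < a.1 := by
    have := (List.pairwise_append.mp hR).2.1
    exact fun a ha => List.rel_of_pairwise_cons this ha
  have hfil : (s ++ e :: t).filter (fun p => p.1 ≠ e.1) = s ++ t := by
    rw [List.filter_append]
    congr 1
    · exact List.filter_eq_self.mpr (fun a ha => by simpa using (hs a ha).ne)
    · rw [List.filter_cons]
      simp only [ne_eq, not_true_eq_false, decide_false, Bool.false_eq_true, if_false]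
      exact List.filter_eq_self.mpr (fun a ha => by simpa using (ht a ha).ne')
  have hst_pw : (s ++ t).Pairwise (fun p q => p.1 < q.1) := by
    have := hR.filter (fun (p : Int × Int) => decide (p.1 ≠ e.1))
    rw [hfil] at this
    exact this
  rw [hfil]
  apply pvUniq
  · refine (PySem.List.sorted_perm _ _ _).trans ?_
    refine (List.perm_middle).trans ?_
    exact List.Perm.cons e (PySem.List.sorted_perm (s ++ t) (fun x => x.2) false).symm
  · exact pv_sorted_pairwise_pvLt _ hR
  · constructor
    · intro a ha
      have hast : a ∈ s ++ t := (PySem.List.mem_sorted ..).mp ha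
      have hane : a.1 ≠ e.1 := by
        rcases List.mem_append.mp hast with h | h
        · exact (hs a h).ne
        · exact (ht a h).ne'
      have haR : a ∈ s ++ e :: t := by
        rcases List.mem_append.mp hast with h | h
        · exact List.mem_append_left _ h
        · exact List.mem_append_right _ (List.mem_cons_of_mem _ h)
      rcases hmin a haR with rfl | h
      · exact absurd rfl hane
      · exact h
    · exact pv_sorted_pairwise_pvLt _ hst_pw

-- proof-only abbreviations for the strict-min scan
def pvCAt (costs : List Int) (i : Int) : Int := PySem.List.pyGetD costs i 0

def pvStep (costs : List Int) (used : PySem.Set Int) (best : Int) (p : Int × Int) : Int :=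
  if PySem.Set.contains used p.1 then best
  else if best == -1 || p.2 < pvCAt costs best then p.1
  else best

def pvCand (costs : List Int) (used : PySem.Set Int) (M : List (Int × Int)) (b : Int) :
    List (Int × Int) :=
  (if b = -1 then [] else [(b, pvCAt costs b)]) ++
    M.filter (fun p => !(PySem.Set.contains used p.1))

def pvMinSpec (costs : List Int) (r : Int) (C : List (Int × Int)) : Prop :=
  (r, pvCAt costs r) ∈ C ∧ ∀ a ∈ C, a = (r, pvCAt costs r) ∨ pvLt (r, pvCAt costs r) a

-- the pvLt-minimum specification of one strict-min scan
theorem pv_scan_spec (costs : List Int) (used : PySem.Set Int) :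
    ∀ (M : List (Int × Int)) (b : Int),
      (∀ p ∈ M, pvCAt costs p.1 = p.2) →
      (∀ p ∈ M, 0 ≤ p.1) →
      M.Pairwise (fun p q => p.1 < q.1) →
      (b = -1 ∨ (PySem.Set.contains used b = false ∧ ∀ p ∈ M, b < p.1)) →
      (pvCand costs used M b = [] ∧ M.foldl (pvStep costs used) b = -1) ∨
        pvMinSpec costs (M.foldl (pvStep costs used) b) (pvCand costs used M b) := by
  intro M
  induction M with
  | nil =>
    intro b _ _ _ _
    by_cases hb : b = -1
    · exact Or.inl (by simp [pvCand, hb])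
    · refine Or.inr ⟨?_, ?_⟩
      · simp [pvCand, hb]
      · intro a ha
        simp [pvCand, hb] at ha
        exact Or.inl (by simp [ha])
  | cons p M ih =>
    intro b hget hpos hpw hb
    have hposM : ∀ q ∈ M, 0 ≤ q.1 := fun q hq => hpos q (List.mem_cons_of_mem _ hq)
    have hp1 : p.1 ≠ -1 := by have := hpos p (List.mem_cons_self ..); omega
    have hgetM : ∀ q ∈ M, pvCAt costs q.1 = q.2 := fun q hq => hget q (List.mem_cons_of_mem _ hq)
    have hgetp : pvCAt costs p.1 = p.2 := hget p (List.mem_cons_self ..)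
    have hpwM := hpw.of_cons
    have hplt : ∀ q ∈ M, p.1 < q.1 := fun q hq => List.rel_of_pairwise_cons hpw hq
    rw [List.foldl_cons]
    by_cases hu : PySem.Set.contains used p.1
    · -- p is used: it is skipped and filtered out
      have humem : p.1 ∈ used := (PySem.Set.contains_iff used p.1).mp hu
      have hstep : pvStep costs used b p = b := by unfold pvStep; rw [if_pos hu]
      have hcand : pvCand costs used (p :: M) b = pvCand costs used M b := by
        have hc : ¬((!PySem.Set.contains used p.1) = true) := by simp [humem]
        unfold pvCand
        rw [List.filter_cons, if_neg hc]
      rw [hstep, hcand]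
      refine ih b hgetM hposM hpwM ?_
      rcases hb with hb | ⟨hb1, hb2⟩
      · exact Or.inl hb
      · exact Or.inr ⟨hb1, fun q hq => hb2 q (List.mem_cons_of_mem _ hq)⟩
    · have hu' : PySem.Set.contains used p.1 = false := by simpa using hu
      have hnm : p.1 ∉ used := fun h => hu ((PySem.Set.contains_iff used p.1).mpr h)
      have hcand : pvCand costs used (p :: M) b =
          (if b = -1 then [] else [(b, pvCAt costs b)]) ++ p :: M.filter (fun q => !(PySem.Set.contains used q.1)) := by
        have hc : (!PySem.Set.contains used p.1) = true := by simp [hnm]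
        unfold pvCand
        rw [List.filter_cons, if_pos hc]
      by_cases hbm : b = -1
      · -- first unused index becomes the best
        have hstep : pvStep costs used b p = p.1 := by
          have hc1 : ¬(PySem.Set.contains used p.1 = true) := by simp [hnm]
          have hc2 : ((b == -1 || decide (p.2 < pvCAt costs b)) = true) := by simp [hbm]
          unfold pvStep
          rw [if_neg hc1, if_pos hc2]
        rw [hstep]
        have hres := ih p.1 hgetM hposM hpwM (Or.inr ⟨hu', hplt⟩)
        have hpe : (p.1, pvCAt costs p.1) = p := by rw [hgetp]
        have hcand' : pvCand costs used M p.1 = p :: M.filter (fun q => !(PySem.Set.contains used q.1)) := by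
          simp [pvCand, hp1, hpe]
        rw [hcand'] at hres
        have hcand2 : pvCand costs used (p :: M) b = p :: M.filter (fun q => !(PySem.Set.contains used q.1)) := by
          rw [hcand, if_pos hbm, List.nil_append]
        rw [hcand2]
        rcases hres with ⟨hC, _⟩ | hres
        · exact absurd hC (by simp)
        · exact Or.inr hres
      · rcases hb with hb | ⟨hbu, hblt⟩
        · exact absurd hb hbm
        have hbp1 : b < p.1 := hblt p (List.mem_cons_self ..)
        have hbltM : ∀ q ∈ M, b < q.1 := fun q hq => hblt q (List.mem_cons_of_mem _ hq)
        by_cases hlt : p.2 < pvCAt costs b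
        · -- strictly smaller cost: p becomes the best
          have hstep : pvStep costs used b p = p.1 := by
            have hc1 : ¬(PySem.Set.contains used p.1 = true) := by simp [hnm]
            have hc2 : ((b == -1 || decide (p.2 < pvCAt costs b)) = true) := by simp [hlt]
            unfold pvStep
            rw [if_neg hc1, if_pos hc2]
          rw [hstep]
          have hres := ih p.1 hgetM hposM hpwM (Or.inr ⟨hu', hplt⟩)
          have hpe : (p.1, pvCAt costs p.1) = p := by rw [hgetp]
          have hcand' : pvCand costs used M p.1 = p :: M.filter (fun q => !(PySem.Set.contains used q.1)) := by
            simp [pvCand, hp1, hpe]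
          rw [hcand'] at hres
          have hcand2 : pvCand costs used (p :: M) b =
              (b, pvCAt costs b) :: p :: M.filter (fun q => !(PySem.Set.contains used q.1)) := by
            rw [hcand, if_neg hbm, List.singleton_append]
          rcases hres with ⟨hC, _⟩ | ⟨hmem, hmin⟩
          · exact absurd hC (by simp)
          refine Or.inr ⟨?_, ?_⟩
          · rw [hcand2]
            exact List.mem_cons_of_mem _ hmem
          · intro a ha
            rw [hcand2] at ha
            rcases List.mem_cons.mp ha with ha' | ha
            · -- a = (b, cAt b); the new minimum beats it through p
              right
              have hrp := hmin p (List.mem_cons_self ..)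
              have hpb : pvLt p (b, pvCAt costs b) := Or.inl hlt
              rcases hrp with hrp | hrp
              · rw [ha', ← hrp]; exact hpb
              · rw [ha']; exact pvLt_trans hrp hpb
            · exact hmin a ha
        · -- keep the current best (ties keep the earlier index)
          have hstep : pvStep costs used b p = b := by
            have hc1 : ¬(PySem.Set.contains used p.1 = true) := by simp [hnm]
            have hc2 : ¬((b == -1 || decide (p.2 < pvCAt costs b)) = true) := by simp [hbm, hlt]
            unfold pvStep
            rw [if_neg hc1, if_neg hc2]
          rw [hstep]
          have hres := ih b hgetM hposM hpwM (Or.inr ⟨hbu, hbltM⟩)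
          have hcand' : pvCand costs used M b = (b, pvCAt costs b) :: M.filter (fun q => !(PySem.Set.contains used q.1)) := by
            unfold pvCand
            rw [if_neg hbm, List.singleton_append]
          rw [hcand'] at hres
          rcases hres with ⟨hC, _⟩ | ⟨hmem, hmin⟩
          · exact absurd hC (by simp)
          have hbpLt : pvLt (b, pvCAt costs b) p := by
            have hle : pvCAt costs b ≤ p.2 := le_of_not_gt hlt
            rcases lt_or_eq_of_le hle with h | h
            · exact Or.inl h
            · exact Or.inr ⟨h, hbp1⟩
          have hrb := hmin (b, pvCAt costs b) (List.mem_cons_self ..)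
          have hrp : pvLt (List.foldl (pvStep costs used) b M, pvCAt costs (List.foldl (pvStep costs used) b M)) p ∨
              (List.foldl (pvStep costs used) b M, pvCAt costs (List.foldl (pvStep costs used) b M)) = (b, pvCAt costs b) := by
            rcases hrb with h | h
            · exact Or.inl (h ▸ hbpLt)
            · exact Or.inl (pvLt_trans h hbpLt)
          have hcand2 : pvCand costs used (p :: M) b =
              (b, pvCAt costs b) :: p :: M.filter (fun q => !(PySem.Set.contains used q.1)) := by
            rw [hcand, if_neg hbm, List.singleton_append]
          refine Or.inr ⟨?_, ?_⟩
          · rw [hcand2]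
            rcases List.mem_cons.mp hmem with h | h
            · rw [h]; exact List.mem_cons_self ..
            · exact List.mem_cons_of_mem _ (List.mem_cons_of_mem _ h)
          · intro a ha
            rw [hcand2] at ha
            rcases List.mem_cons.mp ha with ha' | ha
            · rw [ha']
              exact hmin _ (List.mem_cons_self ..)
            · rcases List.mem_cons.mp ha with rfl | ha
              · rcases hrp with h | h
                · exact Or.inr h
                · rw [h]; exact Or.inr hbpLt
              · exact hmin a (List.mem_cons_of_mem _ ha)

theorem pv_scan_eq_fold (costs : List Int) (used : PySem.Set Int) :
    pvScan costs used = (PySem.List.enumerate costs 0).foldl (pvStep costs used) (-1) := by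
  rw [PySem.List.enumerate_eq_map_pyRange costs 0, List.foldl_map]
  rfl

theorem pv_enum_get (costs : List Int) :
    ∀ p ∈ PySem.List.enumerate costs 0, pvCAt costs p.1 = p.2 := by
  intro p hp
  obtain ⟨k, hk, rfl⟩ := (PySem.List.mem_enumerate_iff costs 0 p).mp hp
  show pvCAt costs (0 + (k : Int)) = costs[k]
  rw [zero_add]
  unfold pvCAt
  rw [PySem.List.pyGetD_natCast]
  exact List.getD_eq_getElem costs 0 hk

theorem pv_enum_pos (costs : List Int) :
    ∀ p ∈ PySem.List.enumerate costs 0, 0 ≤ p.1 := by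
  intro p hp
  obtain ⟨k, hk, rfl⟩ := (PySem.List.mem_enumerate_iff costs 0 p).mp hp
  show (0 : Int) ≤ 0 + (k : Int)
  omega

theorem pv_filter_add (costs : List Int) (used : PySem.Set Int) (r : Int) :
    (PySem.List.enumerate costs 0).filter (fun p => !(PySem.Set.contains (PySem.Set.add used r) p.1)) =
      ((PySem.List.enumerate costs 0).filter (fun p => !(PySem.Set.contains used p.1))).filter
        (fun p => decide (p.1 ≠ r)) := by
  rw [List.filter_filter]
  apply List.filter_congr
  intro p _
  have hadd := PySem.Set.mem_add used r p.1
  have h1 := PySem.Set.contains_iff (PySem.Set.add used r) p.1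
  have h2 := PySem.Set.contains_iff used p.1
  cases hc1 : PySem.Set.contains (PySem.Set.add used r) p.1 <;>
    cases hc2 : PySem.Set.contains used p.1 <;>
      by_cases hr : p.1 = r <;> simp_all

-- main loop invariant: m strict-min picks = the first m indices of the stable sort of the
-- remaining (unused) enumerated pairs
theorem pv_picks_eq (costs : List Int) :
    ∀ (m : Nat) (used : PySem.Set Int),
      m ≤ ((PySem.List.enumerate costs 0).filter (fun p => !(PySem.Set.contains used p.1))).length →
      pvPicks costs m used =
        ((PySem.List.sorted ((PySem.List.enumerate costs 0).filter (fun p => !(PySem.Set.contains used p.1))) (fun x => x.2) false).take m).map (fun p => p.1) := by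
  intro m
  induction m with
  | zero => intro used _; simp [pvPicks]
  | succ m ih =>
    intro used hlen
    have key := pv_scan_spec costs used (PySem.List.enumerate costs 0) (-1)
      (pv_enum_get costs) (pv_enum_pos costs) (PySem.List.pairwise_lt_enumerate costs 0) (Or.inl rfl)
    have hcand : pvCand costs used (PySem.List.enumerate costs 0) (-1) =
        (PySem.List.enumerate costs 0).filter (fun p => !(PySem.Set.contains used p.1)) := by
      unfold pvCand
      rw [if_pos rfl, List.nil_append]
    rw [hcand] at key
    rcases key with ⟨hC, _⟩ | ⟨hmem, hmin⟩
    · rw [hC] at hlen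
      simp at hlen
    have hRpw : ((PySem.List.enumerate costs 0).filter (fun p => !(PySem.Set.contains used p.1))).Pairwise
        (fun p q => p.1 < q.1) :=
      (PySem.List.pairwise_lt_enumerate costs 0).filter _
    have hsorted := pv_sorted_cons_min _ _ hRpw hmem hmin
    have hscan : pvScan costs used = (PySem.List.enumerate costs 0).foldl (pvStep costs used) (-1) :=
      pv_scan_eq_fold costs used
    have hfadd := pv_filter_add costs used ((PySem.List.enumerate costs 0).foldl (pvStep costs used) (-1))
    have hlen2 : ((PySem.List.enumerate costs 0).filter (fun p => !(PySem.Set.contains used p.1))).length =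
        (((PySem.List.enumerate costs 0).filter (fun p => !(PySem.Set.contains used p.1))).filter
          (fun p => decide (p.1 ≠ (PySem.List.enumerate costs 0).foldl (pvStep costs used) (-1)))).length + 1 := by
      have h1 := PySem.List.length_sorted
        ((PySem.List.enumerate costs 0).filter (fun p => !(PySem.Set.contains used p.1))) (fun x => x.2) false
      rw [hsorted] at h1
      simp only [List.length_cons] at h1
      rw [PySem.List.length_sorted] at h1
      omega
    have hih := ih (PySem.Set.add used ((PySem.List.enumerate costs 0).foldl (pvStep costs used) (-1)))
      (by rw [hfadd]; omega)
    rw [hfadd] at hih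
    show pvScan costs used :: pvPicks costs m _ = _
    rw [hscan, hih, hsorted, List.take_succ_cons, List.map_cons]
  

theorem pv_map_pyGetD_range_eq_take {α : Type} (xs : List α) (d : α) :
    ∀ (k : Nat), k ≤ xs.length →
      (PySem.List.pyRange 0 (k : Int) 1).map (fun i => PySem.List.pyGetD xs i d) = xs.take k := by
  intro k
  induction k with
  | zero => intro _; rw [show ((0:Nat):Int) = 0 from rfl, PySem.List.pyRange_one_eq_nil le_rfl]; rfl
  | succ k ih =>
    intro hk
    have h0 : (0 : Int) ≤ k := by positivity
    rw [show ((k + 1 : Nat) : Int) = (k : Int) + 1 by push_cast; ring,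
      PySem.List.pyRange_one_succ_right h0, List.map_append, ih (by omega)]
    simp only [List.map_cons, List.map_nil]
    have : PySem.List.pyGetD xs (k : Int) d = xs[k] := by
      rw [PySem.List.pyGetD_natCast]
      exact List.getD_eq_getElem xs d hk
    rw [this, List.take_succ, List.getElem?_eq_getElem hk]
    rfl

-- ===== VERDICT (by name: the statement is the Claim_ definition above) =====
theorem getBestPaths_spec : Claim_equal_getBestPaths := by
  intro paths costs _ _
  unfold Spec_getBestPaths
  have hfil0 : (PySem.List.enumerate costs 0).filter
      (fun p => !(PySem.Set.contains PySem.Set.empty p.1)) = PySem.List.enumerate costs 0 :=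
    List.filter_eq_self.mpr (fun a _ => rfl)
  have hmle : min 3 costs.length ≤
      ((PySem.List.enumerate costs 0).filter (fun p => !(PySem.Set.contains PySem.Set.empty p.1))).length := by
    rw [hfil0, PySem.List.length_enumerate]
    omega
  have hB := pv_picks_eq costs (min 3 costs.length) PySem.Set.empty hmle
  rw [hfil0] at hB
  have hlenS : (PySem.List.sorted (PySem.List.enumerate costs 0) (fun x => x.2) false).length = costs.length := by
    rw [PySem.List.length_sorted, PySem.List.length_enumerate]
  unfold getBestPaths getBestPaths_alt
  rw [hB]
  show (if (((PySem.List.sorted (PySem.List.enumerate costs 0) (fun x => x.2) false).length : Int) > 3)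
      then (PySem.List.pyRange 0 3 1).map (fun i => PySem.List.pyGetD (PySem.List.sorted (PySem.List.enumerate costs 0) (fun x => x.2) false) i (0, 0))
      else (PySem.List.pyRange 0 (((PySem.List.sorted (PySem.List.enumerate costs 0) (fun x => x.2) false).length : Int)) 1).map (fun i => PySem.List.pyGetD (PySem.List.sorted (PySem.List.enumerate costs 0) (fun x => x.2) false) i (0, 0))).map
        (fun c => PySem.List.pyGetD paths c.1 []) =
    List.map (fun i => PySem.List.pyGetD paths i [])
      (List.map (fun p => p.1) (List.take (min 3 costs.length) (PySem.List.sorted (PySem.List.enumerate costs 0) (fun x => x.2) false)))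
  by_cases h3 : (((PySem.List.sorted (PySem.List.enumerate costs 0) (fun x => x.2) false).length : Int) > 3)
  · have h3' : 3 ≤ (PySem.List.sorted (PySem.List.enumerate costs 0) (fun x => x.2) false).length := by exact_mod_cast h3.le
    have hmin : min 3 costs.length = 3 := by
      rw [hlenS] at h3'
      omega
    rw [if_pos h3, show (3 : Int) = ((3 : Nat) : Int) by norm_num,
      pv_map_pyGetD_range_eq_take (PySem.List.sorted (PySem.List.enumerate costs 0) (fun x => x.2) false) (0, 0) 3 h3', hmin, List.map_map]
    rfl
  · have h3' : costs.length ≤ 3 := by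
      rw [← hlenS]
      by_contra hcon
      exact h3 (by exact_mod_cast Nat.lt_of_not_le hcon)
    have hmin : min 3 costs.length = costs.length := by omega
    rw [if_neg h3, pv_map_pyGetD_range_eq_take (PySem.List.sorted (PySem.List.enumerate costs 0) (fun x => x.2) false) (0, 0) (PySem.List.sorted (PySem.List.enumerate costs 0) (fun x => x.2) false).length le_rfl, hmin, hlenS,
      List.map_map]
    rfl
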